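-- pv_equiv track=rewrite | github.com/TempoX-Ltda/tx-busca-retrabalho-focco | src/busca_retrabalho.py | textoBorda
-- ===== SOURCE A (Python) =====
-- def textoBorda(roteiro):
--     if not roteiro:
--         return ''
--
--     borda_comp_1 = any(operacao.get('codigo_operacao') in ('5', '31') for operacao in roteiro)
--
--     borda_comp_2 = any(operacao.get('codigo_operacao') in ('6', '32') for operacao in roteiro)
--
--     borda_larg_1 = any(operacao.get('codigo_operacao') in ('7', '33') for operacao in roteiro)
--
--     borda_larg_2 = any(operacao.get('codigo_operacao') in ('8', '34') for operacao in roteiro)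
--
--     return f'{sum([borda_larg_1, borda_larg_2])},{sum([borda_comp_1, borda_comp_2])},BORDA'
-- ===== SOURCE B (Python) =====
-- def textoBorda(roteiro):
--     if not roteiro:
--         return ''
--
--     BIT = {'5': 1, '31': 1, '6': 2, '32': 2, '7': 4, '33': 4, '8': 8, '34': 8}
--
--     mask = 0
--     for operacao in roteiro:
--         mask |= BIT.get(operacao.get('codigo_operacao'), 0)
--
--     larg = (mask >> 2 & 1) + (mask >> 3 & 1)
--     comp = (mask & 1) + (mask >> 1 & 1)
--     return f'{larg},{comp},BORDA'
-- ===== Notes on version B (the rewrite author's own statement) =====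
-- stated objective: alternative
-- what changed: Replaces A's four separate any()-scans over the list by a single fold that ORs a per-code bit (from a code->bit lookup table) into one integer mask, then reads the four border flags off the mask's bits with shift-and arithmetic.
import Mathlib
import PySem

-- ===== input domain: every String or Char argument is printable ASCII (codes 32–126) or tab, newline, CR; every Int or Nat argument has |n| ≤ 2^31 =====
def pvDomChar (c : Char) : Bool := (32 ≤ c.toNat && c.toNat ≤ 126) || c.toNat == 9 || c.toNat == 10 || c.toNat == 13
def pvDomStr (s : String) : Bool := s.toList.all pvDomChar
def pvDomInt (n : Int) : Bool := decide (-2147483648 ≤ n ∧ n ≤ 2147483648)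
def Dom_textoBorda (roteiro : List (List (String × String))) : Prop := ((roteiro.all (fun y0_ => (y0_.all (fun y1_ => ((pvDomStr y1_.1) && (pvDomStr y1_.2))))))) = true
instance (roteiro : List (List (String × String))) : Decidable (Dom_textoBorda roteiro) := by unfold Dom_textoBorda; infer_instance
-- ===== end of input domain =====

-- B replaces A's four any()-scans by one fold ORing per-code bits into a mask, read out by shift-and (alternative algorithm; same result).

-- ===== PORT A =====
-- operacao.get('codigo_operacao') on the dict-as-association-list (shared by both Pythons)
def getCodigo (op : List (String × String)) : Option String :=
  (PySem.Dict.mk op).get? "codigo_operacao"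

def textoBorda (roteiro : List (List (String × String))) : String :=
  if roteiro = [] then "" else
    let borda_comp_1 := roteiro.any (fun operacao => getCodigo operacao == some "5" || getCodigo operacao == some "31")
    let borda_comp_2 := roteiro.any (fun operacao => getCodigo operacao == some "6" || getCodigo operacao == some "32")
    let borda_larg_1 := roteiro.any (fun operacao => getCodigo operacao == some "7" || getCodigo operacao == some "33")
    let borda_larg_2 := roteiro.any (fun operacao => getCodigo operacao == some "8" || getCodigo operacao == some "34")
    PySem.Int.toStr ((if borda_larg_1 then 1 else 0) + (if borda_larg_2 then 1 else 0)) ++ "," ++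
      PySem.Int.toStr ((if borda_comp_1 then 1 else 0) + (if borda_comp_2 then 1 else 0)) ++ ",BORDA"

-- ===== PORT B =====
-- the BIT lookup table; BIT.get(code, 0): a None code is never a key, so it yields the default 0
def bitTable : PySem.Dict String Nat :=
  PySem.Dict.mk [("5", 1), ("31", 1), ("6", 2), ("32", 2), ("7", 4), ("33", 4), ("8", 8), ("34", 8)]

def bitOf (code : Option String) : Nat :=
  match code with
  | none => 0
  | some s => bitTable.getD s 0

-- mask is a Python int that stays in 0..15, so Nat |||, >>>, &&& coincide with Python's exactly
def textoBorda_alt (roteiro : List (List (String × String))) : String :=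
  if roteiro = [] then "" else
    let mask := roteiro.foldl (fun m operacao => m ||| bitOf (getCodigo operacao)) 0
    let larg := ((mask >>> 2) &&& 1) + ((mask >>> 3) &&& 1)
    let comp := (mask &&& 1) + ((mask >>> 1) &&& 1)
    PySem.Int.toStr (larg : Int) ++ "," ++ PySem.Int.toStr (comp : Int) ++ ",BORDA"

-- ===== PRECONDITION & SPEC =====
def Spec_textoBorda (roteiro : List (List (String × String))) (out : String) : Prop := out = textoBorda_alt roteiro
instance (roteiro : List (List (String × String))) (out : String) : Decidable (Spec_textoBorda roteiro out) := by unfold Spec_textoBorda; infer_instance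

-- ===== CLAIM (what is proved, stated in full; the proofs are below) =====
def Claim_equal_textoBorda : Prop := ∀ (roteiro : List (List (String × String))), Dom_textoBorda roteiro → Spec_textoBorda roteiro (textoBorda roteiro)

-- ===== LEMMAS AND PROOFS =====
-- bit k of the OR-fold is set iff some element contributes it
theorem foldl_or_testBit {α : Type} (l : List α) (f : α → Nat) (m k : Nat) :
    ((l.foldl (fun acc x => acc ||| f x) m).testBit k)
      = (m.testBit k || l.any (fun x => (f x).testBit k)) := by
  induction l generalizing m with
  | nil => simp
  | cons a t ih => simp [List.foldl_cons, ih, Bool.or_assoc]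

-- n & 1 as an if on the low bit
theorem extract_bit0 (n : Nat) : n &&& 1 = if n.testBit 0 then 1 else 0 := by
  rw [Nat.and_one_is_mod, Nat.testBit_zero]
  rcases Nat.mod_two_eq_zero_or_one n with h | h <;> simp [h]

theorem get?_nil_str (s : String) : (PySem.Dict.mk ([] : List (String × Nat))).get? s = none := rfl

theorem beq_false_of_not (a s : String) (h : ¬ (a == s) = true) : (s == a) = false := by
  by_cases he : s = a
  · subst he; exact absurd (beq_self_eq_true s) h
  · exact beq_eq_false_iff_ne.mpr he

-- the four bits of the lookup-table value, characterised per code pair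
theorem table_bit_0 (s : String) : (bitTable.getD s 0).testBit 0 = (s == "5" || s == "31") := by
  simp only [bitTable, PySem.Dict.getD_eq_get?_getD, PySem.Dict.get?_mk_cons, get?_nil_str]
  split_ifs with h1 h2 h3 h4 h5 h6 h7 h8 <;>
    try (first | (obtain rfl := eq_of_beq h1) | (obtain rfl := eq_of_beq h2) | (obtain rfl := eq_of_beq h3) | (obtain rfl := eq_of_beq h4) | (obtain rfl := eq_of_beq h5) | (obtain rfl := eq_of_beq h6) | (obtain rfl := eq_of_beq h7) | (obtain rfl := eq_of_beq h8))
  all_goals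
    first
      | decide
      | (rw [beq_false_of_not "5" s h1, beq_false_of_not "31" s h2]; decide)

theorem table_bit_1 (s : String) : (bitTable.getD s 0).testBit 1 = (s == "6" || s == "32") := by
  simp only [bitTable, PySem.Dict.getD_eq_get?_getD, PySem.Dict.get?_mk_cons, get?_nil_str]
  split_ifs with h1 h2 h3 h4 h5 h6 h7 h8 <;>
    try (first | (obtain rfl := eq_of_beq h1) | (obtain rfl := eq_of_beq h2) | (obtain rfl := eq_of_beq h3) | (obtain rfl := eq_of_beq h4) | (obtain rfl := eq_of_beq h5) | (obtain rfl := eq_of_beq h6) | (obtain rfl := eq_of_beq h7) | (obtain rfl := eq_of_beq h8))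
  all_goals
    first
      | decide
      | (rw [beq_false_of_not "6" s h3, beq_false_of_not "32" s h4]; decide)

theorem table_bit_2 (s : String) : (bitTable.getD s 0).testBit 2 = (s == "7" || s == "33") := by
  simp only [bitTable, PySem.Dict.getD_eq_get?_getD, PySem.Dict.get?_mk_cons, get?_nil_str]
  split_ifs with h1 h2 h3 h4 h5 h6 h7 h8 <;>
    try (first | (obtain rfl := eq_of_beq h1) | (obtain rfl := eq_of_beq h2) | (obtain rfl := eq_of_beq h3) | (obtain rfl := eq_of_beq h4) | (obtain rfl := eq_of_beq h5) | (obtain rfl := eq_of_beq h6) | (obtain rfl := eq_of_beq h7) | (obtain rfl := eq_of_beq h8))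
  all_goals
    first
      | decide
      | (rw [beq_false_of_not "7" s h5, beq_false_of_not "33" s h6]; decide)

theorem table_bit_3 (s : String) : (bitTable.getD s 0).testBit 3 = (s == "8" || s == "34") := by
  simp only [bitTable, PySem.Dict.getD_eq_get?_getD, PySem.Dict.get?_mk_cons, get?_nil_str]
  split_ifs with h1 h2 h3 h4 h5 h6 h7 h8 <;>
    try (first | (obtain rfl := eq_of_beq h1) | (obtain rfl := eq_of_beq h2) | (obtain rfl := eq_of_beq h3) | (obtain rfl := eq_of_beq h4) | (obtain rfl := eq_of_beq h5) | (obtain rfl := eq_of_beq h6) | (obtain rfl := eq_of_beq h7) | (obtain rfl := eq_of_beq h8))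
  all_goals
    first
      | decide
      | (rw [beq_false_of_not "8" s h7, beq_false_of_not "34" s h8]; decide)

-- lift a table characterisation through the Option (a None code contributes no bit)
theorem bitOf_testBit (c : Option String) (k : Nat) (v w : String)
    (hvw : ∀ s, (bitTable.getD s 0).testBit k = (s == v || s == w)) :
    (bitOf c).testBit k = (c == some v || c == some w) := by
  cases c with
  | none => simp [bitOf, Nat.zero_testBit]
  | some s => simpa [bitOf] using hvw s

-- mask bit k of B's fold equals A's any-scan for the corresponding code pair
theorem mask_bit (roteiro : List (List (String × String))) (k : Nat) (v w : String)
    (hvw : ∀ s, (bitTable.getD s 0).testBit k = (s == v || s == w)) :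
    ((roteiro.foldl (fun m operacao => m ||| bitOf (getCodigo operacao)) 0).testBit k)
      = roteiro.any (fun operacao => getCodigo operacao == some v || getCodigo operacao == some w) := by
  rw [foldl_or_testBit]
  simp only [Nat.zero_testBit, Bool.false_or]
  exact congrArg _ (funext fun op => bitOf_testBit (getCodigo op) k v w hvw)

-- ===== VERDICT (by name: the statement is the Claim_ definition above) =====
theorem textoBorda_spec : Claim_equal_textoBorda := by
  intro roteiro _
  unfold Spec_textoBorda textoBorda textoBorda_alt
  by_cases h : roteiro = []
  · simp [h]
  · simp only [h, if_false, extract_bit0, Nat.testBit_shiftRight, Nat.add_zero]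
    rw [mask_bit roteiro 0 "5" "31" table_bit_0,
      mask_bit roteiro 1 "6" "32" table_bit_1,
      mask_bit roteiro 2 "7" "33" table_bit_2,
      mask_bit roteiro 3 "8" "34" table_bit_3]
    cases roteiro.any (fun operacao => getCodigo operacao == some "5" || getCodigo operacao == some "31") <;>
    cases roteiro.any (fun operacao => getCodigo operacao == some "6" || getCodigo operacao == some "32") <;>
    cases roteiro.any (fun operacao => getCodigo operacao == some "7" || getCodigo operacao == some "33") <;>
    cases roteiro.any (fun operacao => getCodigo operacao == some "8" || getCodigo operacao == some "34") <;>
    rfl
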